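-- pv_equiv track=rewrite | github.com/breldridge/Egret | egret/data/lopf_utils.py | get_error_settings_dict
-- ===== SOURCE A (Python) =====
-- def get_error_settings_dict(test_model_list, model='dlopf'):
--
--     tm_list = [tm for tm in test_model_list if model in tm]
--     lazy_list = [tm for tm in tm_list if 'lazy' in tm]
--     if tm_list != lazy_list:
--         tm_list = [tm for tm in tm_list if tm not in lazy_list]
--
--     tm_dict = {}
--     for key in test_model_list:
--         if key in tm_list:
--             tm_dict[key] = True
--         else:
--             tm_dict[key] = False
--
--     return tm_dict
-- ===== SOURCE B (Python) =====
-- def get_error_settings_dict(test_model_list, model='dlopf'):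
--     has_nonlazy = any(model in tm and 'lazy' not in tm for tm in test_model_list)
--     tm_dict = {}
--     for key in test_model_list:
--         tm_dict[key] = model in key and (not has_nonlazy or 'lazy' not in key)
--     return tm_dict
-- ===== Notes on version B (the rewrite author's own statement) =====
-- stated objective: simpler
-- what changed: Replaces the two intermediate filtered lists and the per-key list-membership test with one boolean flag (is there a non-lazy match?) computed up front and a single direct pass assigning each key's value from that flag.
import Mathlib
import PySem

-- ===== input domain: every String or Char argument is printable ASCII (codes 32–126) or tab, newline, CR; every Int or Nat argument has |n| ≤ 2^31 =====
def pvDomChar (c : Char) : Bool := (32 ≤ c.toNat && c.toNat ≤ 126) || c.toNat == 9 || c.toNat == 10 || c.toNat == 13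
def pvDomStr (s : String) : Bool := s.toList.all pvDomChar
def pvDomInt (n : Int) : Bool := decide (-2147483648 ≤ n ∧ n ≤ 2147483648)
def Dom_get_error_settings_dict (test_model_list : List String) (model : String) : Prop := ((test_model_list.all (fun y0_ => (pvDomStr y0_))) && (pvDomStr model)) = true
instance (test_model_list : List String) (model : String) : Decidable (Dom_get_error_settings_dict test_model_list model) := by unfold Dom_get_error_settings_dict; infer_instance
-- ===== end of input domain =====

-- B replaces A's two intermediate filtered lists and per-key list-membership test by one
-- up-front boolean flag ("is there a non-lazy match?") and a single direct pass (simpler).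

-- ===== PORT A =====
def get_error_settings_dict (test_model_list : List String) (model : String) : List (String × Bool) :=
  let tm_list := test_model_list.filter (fun tm => PySem.Str.isIn model tm)
  let lazy_list := tm_list.filter (fun tm => PySem.Str.isIn "lazy" tm)
  let tm_list2 := if tm_list ≠ lazy_list then tm_list.filter (fun tm => !lazy_list.contains tm) else tm_list
  (test_model_list.foldl
    (fun d key => if tm_list2.contains key then d.insert key true else d.insert key false)
    (PySem.Dict.empty : PySem.Dict String Bool)).items

-- ===== PORT B =====
def get_error_settings_dict_alt (test_model_list : List String) (model : String) : List (String × Bool) :=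
  let has_nonlazy := test_model_list.any (fun tm => PySem.Str.isIn model tm && !PySem.Str.isIn "lazy" tm)
  (test_model_list.foldl
    (fun d key => d.insert key (PySem.Str.isIn model key && (!has_nonlazy || !PySem.Str.isIn "lazy" key)))
    (PySem.Dict.empty : PySem.Dict String Bool)).items

-- ===== PRECONDITION & SPEC =====
def Spec_get_error_settings_dict (test_model_list : List String) (model : String) (out : List (String × Bool)) : Prop := out = get_error_settings_dict_alt test_model_list model
instance (test_model_list : List String) (model : String) (out : List (String × Bool)) : Decidable (Spec_get_error_settings_dict test_model_list model out) := by unfold Spec_get_error_settings_dict; infer_instance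

-- ===== CLAIM (what is proved, stated in full; the proofs are below) =====
def Claim_equal_get_error_settings_dict : Prop := ∀ (test_model_list : List String) (model : String), Dom_get_error_settings_dict test_model_list model → Spec_get_error_settings_dict test_model_list model (get_error_settings_dict test_model_list model)

-- ===== LEMMAS AND PROOFS =====

-- A Bool-valued insert collapses A's two-branch if.
theorem pv_insert_if (d : PySem.Dict String Bool) (k : String) (b : Bool) :
    (if b = true then d.insert k true else d.insert k false) = d.insert k b := by
  cases b <;> rfl

theorem pv_contains_filter (P : String → Bool) (l : List String) (key : String) :
    (l.filter P).contains key = (decide (key ∈ l) && P key) := by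
  by_cases hmem : key ∈ l.filter P
  · have hm := List.mem_filter.mp hmem
    rw [List.contains_iff_mem.mpr hmem]
    simp [hm.1, hm.2]
  · have hc : (l.filter P).contains key = false := by
      rw [Bool.eq_false_iff, Ne, List.contains_iff_mem]
      exact hmem
    rw [hc]
    rcases Decidable.em (key ∈ l) with hm | hm
    · have hp : P key = false := by
        cases hP : P key
        · rfl
        · exact absurd (List.mem_filter.mpr ⟨hm, hP⟩) hmem
      simp [hp]
    · simp [hm]

-- For any key drawn from the input list, A's final membership test (p = key matches the
-- model, q = key is lazy) agrees with B's flag formula.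
theorem pv_key_cond (p q : String → Bool) (l : List String) (key : String) (hk : key ∈ l) :
    ((if l.filter p ≠ (l.filter p).filter q
      then (l.filter p).filter (fun tm => !((l.filter p).filter q).contains tm)
      else l.filter p).contains key)
    = (p key && (!(l.any (fun tm => p tm && !q tm)) || !q key)) := by
  by_cases h : l.filter p = (l.filter p).filter q
  · -- all matches are lazy: the flag is false, A keeps tm_list unchanged
    have hall : ∀ tm ∈ l.filter p, q tm = true := List.filter_eq_self.mp h.symm
    have hflag : l.any (fun tm => p tm && !q tm) = false := by
      rw [List.any_eq_false]
      intro tm htm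
      simp only [Bool.and_eq_true, Bool.not_eq_true', not_and]
      intro hp hl
      rw [hall tm (List.mem_filter.mpr ⟨htm, hp⟩)] at hl
      simp at hl
    rw [if_neg (not_not_intro h), hflag, pv_contains_filter]
    simp [hk]
  · -- some match is non-lazy: the flag is true, A filters the lazy matches out
    have hex : ∃ tm ∈ l.filter p, ¬ q tm = true := by
      by_contra hc
      push Not at hc
      exact h (List.filter_eq_self.mpr hc).symm
    have hflag : l.any (fun tm => p tm && !q tm) = true := by
      rw [List.any_eq_true]
      obtain ⟨tm, htm, hl⟩ := hex
      have hmem := List.mem_filter.mp htm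
      refine ⟨tm, hmem.1, ?_⟩
      rw [Bool.and_eq_true, Bool.not_eq_true']
      exact ⟨hmem.2, Bool.eq_false_iff.mpr hl⟩
    rw [if_pos h, hflag, pv_contains_filter, pv_contains_filter]
    cases hp : p key <;> cases hl : q key <;> simp [List.mem_filter, hk, hp, hl]

-- ===== VERDICT (by name: the statement is the Claim_ definition above) =====
theorem get_error_settings_dict_spec : Claim_equal_get_error_settings_dict := by
  intro test_model_list model _
  unfold Spec_get_error_settings_dict get_error_settings_dict get_error_settings_dict_alt
  dsimp only
  congr 1
  apply PySem.List.foldl_congr_mem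
  intro d key hk
  rw [pv_key_cond (fun tm => PySem.Str.isIn model tm) (fun tm => PySem.Str.isIn "lazy" tm)
      test_model_list key hk]
  exact pv_insert_if d key _
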